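-- pv_equiv track=rewrite | github.com/therooler/glowjaw | glowjaw/circuits.py | first_neighbours_indices2
-- ===== SOURCE A (Python) =====
-- def first_neighbours_indices2(control, target):
--     ind = []
--     distance = abs(control - target)
--
--     if control < target:
--         for i in range(distance - 1):
--             ind.append([control + i + 1, control + i])
--             ind.append([control + i, control + i + 1])
--         ind.append([control + distance - 1, target])
--         for i in range(distance - 2, -1, -1):
--             ind.append([control + i, control + i + 1])
--             ind.append([control + i + 1, control + i])
--     elif control > target:
--         for i in range(distance - 1):
--             ind.append([control - i - 1, control - i])
--             ind.append([control - i, control - i - 1])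
--         ind.append([control - distance + 1, target])
--         for i in range(distance - 2, -1, -1):
--             ind.append([control - i, control - i - 1])
--             ind.append([control - i - 1, control - i])
--     return (ind)
-- ===== SOURCE B (Python) =====
-- def first_neighbours_indices2(control, target):
--     # Closed form: the k-th output pair is computed directly from k.
--     d = abs(control - target)
--     step = 1 if control < target else -1
--     out = []
--     for k in range(4 * d - 3):
--         j = min(k, 4 * d - 4 - k)
--         i, r = divmod(j, 2)
--         a = control + step * i
--         if r or j == 2 * d - 2:
--             out.append([a, a + step])
--         else:
--             out.append([a + step, a])
--     return out
-- ===== Notes on version B (the rewrite author's own statement) =====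
-- stated objective: alternative
-- what changed: B replaces A's two sign branches with four staged loops by a single loop that computes the k-th output pair directly from its position k via a closed-form index formula (fold the palindromic position with min, then divmod by 2).
import Mathlib
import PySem

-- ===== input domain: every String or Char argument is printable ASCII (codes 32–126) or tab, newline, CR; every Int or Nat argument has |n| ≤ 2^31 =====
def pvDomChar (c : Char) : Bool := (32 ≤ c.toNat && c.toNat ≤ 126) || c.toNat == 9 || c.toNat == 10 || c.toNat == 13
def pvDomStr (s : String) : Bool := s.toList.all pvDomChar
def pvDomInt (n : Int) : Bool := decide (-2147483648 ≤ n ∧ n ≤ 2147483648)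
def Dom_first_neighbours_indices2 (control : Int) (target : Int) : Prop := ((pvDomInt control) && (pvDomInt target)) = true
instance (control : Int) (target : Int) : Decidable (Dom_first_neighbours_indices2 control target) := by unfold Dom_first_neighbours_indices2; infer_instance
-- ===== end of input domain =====

-- B computes each output pair directly from its position k by a closed-form index formula (one loop, no staged forward/backward loops); alternative decomposition, same cost.

-- ===== PORT A =====
def first_neighbours_indices2 (control : Int) (target : Int) : List (List Int) :=
  let ind : List (List Int) := []
  let distance : Int := |control - target|
  if control < target then
    let ind := (PySem.List.pyRange 0 (distance - 1) 1).foldl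
      (fun acc i => acc ++ [[control + i + 1, control + i], [control + i, control + i + 1]]) ind
    let ind := ind ++ [[control + distance - 1, target]]
    let ind := (PySem.List.pyRange (distance - 2) (-1) (-1)).foldl
      (fun acc i => acc ++ [[control + i, control + i + 1], [control + i + 1, control + i]]) ind
    ind
  else if control > target then
    let ind := (PySem.List.pyRange 0 (distance - 1) 1).foldl
      (fun acc i => acc ++ [[control - i - 1, control - i], [control - i, control - i - 1]]) ind
    let ind := ind ++ [[control - distance + 1, target]]
    let ind := (PySem.List.pyRange (distance - 2) (-1) (-1)).foldl
      (fun acc i => acc ++ [[control - i, control - i - 1], [control - i - 1, control - i]]) ind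
    ind
  else ind

-- ===== PORT B =====
def first_neighbours_indices2_alt (control : Int) (target : Int) : List (List Int) :=
  let d : Int := |control - target|
  let step : Int := if control < target then 1 else -1
  (PySem.List.pyRange 0 (4 * d - 3) 1).foldl
    (fun out k =>
      let j := min k (4 * d - 4 - k)
      let i := PySem.Int.floordiv j 2
      let r := PySem.Int.mod j 2
      let a := control + step * i
      if r ≠ 0 ∨ j = 2 * d - 2 then out ++ [[a, a + step]]
      else out ++ [[a + step, a]]) []

-- ===== PRECONDITION & SPEC =====
def Spec_first_neighbours_indices2 (control : Int) (target : Int) (out : List (List Int)) : Prop := out = first_neighbours_indices2_alt control target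
instance (control : Int) (target : Int) (out : List (List Int)) : Decidable (Spec_first_neighbours_indices2 control target out) := by unfold Spec_first_neighbours_indices2; infer_instance

-- ===== CLAIM (what is proved, stated in full; the proofs are below) =====
def Claim_equal_first_neighbours_indices2 : Prop := ∀ (control : Int) (target : Int), Dom_first_neighbours_indices2 control target → Spec_first_neighbours_indices2 control target (first_neighbours_indices2 control target)

-- ===== LEMMAS AND PROOFS =====

-- the canonical pair list both programs produce: forward blocks, then centre, then the blocks reversed
def pvF (c s : Int) (n : Nat) : List (List Int) :=
  (List.range n).flatMap
    (fun k : Nat => [[c + s * (k : Int) + s, c + s * (k : Int)],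
                     [c + s * (k : Int), c + s * (k : Int) + s]])

-- B's per-position formula, restricted to positions strictly before the centre, on Nat indices
def pvH (c s : Int) (k : Nat) : List Int :=
  if k % 2 = 1 then [c + s * (k / 2 : Nat), c + s * (k / 2 : Nat) + s]
  else [c + s * (k / 2 : Nat) + s, c + s * (k / 2 : Nat)]

-- the backward countdown loop of A produces exactly the reverse of its forward loop
theorem pv_rev_flatMap {α β : Type} (l : List α) (f g : α → List β)
    (h : ∀ a, g a = (f a).reverse) :
    l.reverse.flatMap g = (l.flatMap f).reverse := by
  induction l with
  | nil => simp
  | cons x xs ih => simp [List.flatMap_append, ih, h]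

theorem pv_map_h (c s : Int) (n : Nat) :
    (List.range (2 * n)).map (pvH c s) = pvF c s n := by
  induction n with
  | zero => simp [pvF]
  | succ n ih =>
    have h2 : 2 * (n + 1) = 2 * n + 1 + 1 := by omega
    rw [h2, List.range_succ, List.range_succ, List.map_append, List.map_append, ih]
    have he : pvH c s (2 * n) = [c + s * n + s, c + s * n] := by
      simp [pvH, Nat.mul_mod_right]
    have ho : pvH c s (2 * n + 1) = [c + s * n, c + s * n + s] := by
      have : (2 * n + 1) / 2 = n := by omega
      simp [pvH, this]
    simp only [List.map_cons, List.map_nil, he, ho]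
    simp [pvF, List.range_succ, List.flatMap_append]

theorem pv_map_mirror {β : Type} (h : Nat → β) (m : Nat) :
    (List.range m).map (fun k => h (m - 1 - k)) = ((List.range m).map h).reverse := by
  induction m with
  | zero => simp
  | succ m ih =>
    have L : (List.range (m + 1)).map (fun k => h (m + 1 - 1 - k)) =
        h m :: (List.range m).map (fun k => h (m - 1 - k)) := by
      rw [List.range_succ_eq_map]
      simp only [List.map_cons, List.map_map]
      norm_num
      intro k hk; congr 1; omega
    have R : (((List.range (m + 1)).map h)).reverse = h m :: ((List.range m).map h).reverse := by
      rw [List.range_succ]; simp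
    rw [L, R, ih]

-- B's fold, evaluated: first half, centre, mirrored half
theorem pv_B_eq (c t : Int) (hne : c ≠ t) :
    first_neighbours_indices2_alt c t =
      pvF c (if c < t then 1 else -1) (|c - t| - 1).toNat ++
      [[c + (if c < t then 1 else -1) * ((|c - t| - 1).toNat : Int), t]] ++
      (pvF c (if c < t then 1 else -1) (|c - t| - 1).toNat).reverse := by
  set s : Int := if c < t then 1 else -1 with hs
  set d : Int := |c - t| with hd
  have hd1 : 1 ≤ d := by
    rcases lt_or_gt_of_ne hne with h | h
    · rw [hd, abs_sub_comm]; rw [abs_of_pos (by omega)]; omega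
    · rw [hd, abs_of_pos (by omega)]; omega
  set n : Nat := (d - 1).toNat with hn
  have hnd : d = (n : Int) + 1 := by omega
  have hst : c + s * d = t := by
    rcases lt_or_gt_of_ne hne with h | h
    · have : d = t - c := by rw [hd, abs_sub_comm]; exact abs_of_pos (by omega)
      rw [hs, if_pos h, this]; ring
    · have : d = c - t := by rw [hd]; exact abs_of_pos (by omega)
      rw [hs, if_neg (not_lt_of_gt h), this]; ring
  -- the fold appends one element per k
  simp only [first_neighbours_indices2_alt]
  rw [← hd, ← hs]
  have hstep : (fun (out : List (List Int)) (k : Int) =>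
      let j := min k (4 * d - 4 - k)
      let i := PySem.Int.floordiv j 2
      let r := PySem.Int.mod j 2
      let a := c + s * i
      if r ≠ 0 ∨ j = 2 * d - 2 then out ++ [[a, a + s]]
      else out ++ [[a + s, a]]) =
      (fun out k => out ++ [
        (let j := min k (4 * d - 4 - k)
         let i := PySem.Int.floordiv j 2
         let a := c + s * i
         if PySem.Int.mod j 2 ≠ 0 ∨ j = 2 * d - 2 then [a, a + s] else [a + s, a])]) := by
    funext out k; simp only []; split_ifs <;> rfl
  rw [hstep, PySem.List.foldl_append_singleton_eq_map, List.nil_append,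
    PySem.List.pyRange_one]
  have hN : (4 * d - 3 - 0).toNat = 2 * n + 1 + 2 * n := by omega
  rw [hN, List.map_map, List.range_add, List.range_succ, List.map_append, List.map_append,
    List.map_map]
  congr 1
  · congr 1
    · -- first half: positions k < 2n
      rw [← pv_map_h c s n]
      apply List.map_congr_left
      intro k hk
      rw [List.mem_range] at hk
      simp only [Function.comp]
      have hmin : min (0 + (k : Int)) (4 * d - 4 - (0 + (k : Int))) = (k : Int) := by
        omega
      rw [hmin]
      have hne2 : (k : Int) ≠ 2 * d - 2 := by omega
      have hdiv : PySem.Int.floordiv ((k : Int)) 2 = (((k) / 2 : Nat) : Int) := by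
        exact_mod_cast PySem.Int.floordiv_natCast (k) 2
      have hmod : PySem.Int.mod ((k : Int)) 2 = (((k) % 2 : Nat) : Int) := by
        exact_mod_cast PySem.Int.mod_natCast (k) 2
      rw [hdiv, hmod]
      by_cases hpar : k % 2 = 1
      · rw [if_pos (Or.inl (by exact_mod_cast by omega)), pvH, if_pos hpar]
      · have : k % 2 = 0 := by omega
        rw [if_neg (by push Not; exact ⟨by exact_mod_cast this, hne2⟩), pvH, if_neg hpar]
    · -- centre at position 2n
      simp only [Function.comp, List.map_cons, List.map_nil]
      have hmin : min (0 + ((2 * n : Nat) : Int)) (4 * d - 4 - (0 + ((2 * n : Nat) : Int))) =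
          ((2 * n : Nat) : Int) := by push_cast; omega
      rw [hmin]
      have hdiv : PySem.Int.floordiv (((2 * n : Nat) : Int)) 2 = (((2 * n) / 2 : Nat) : Int) := by
        exact_mod_cast PySem.Int.floordiv_natCast (2 * n) 2
      have hmod : PySem.Int.mod (((2 * n : Nat) : Int)) 2 = (((2 * n) % 2 : Nat) : Int) := by
        exact_mod_cast PySem.Int.mod_natCast (2 * n) 2
      rw [hdiv, hmod]
      have : (2 * n) / 2 = n := by omega
      rw [if_pos (Or.inr (by push_cast; omega)), this]
      have : c + s * (n : Int) + s = t := by rw [← hst, hnd]; ring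
      rw [this]
  · -- mirrored half: positions 2n+1+k, k < 2n
    rw [← pv_map_h c s n, ← pv_map_mirror (pvH c s) (2 * n)]
    apply List.map_congr_left
    intro k hk
    rw [List.mem_range] at hk
    simp only [Function.comp]
    have hmin : min (0 + ((2 * n + 1 + k : Nat) : Int))
        (4 * d - 4 - (0 + ((2 * n + 1 + k : Nat) : Int))) = ((2 * n - 1 - k : Nat) : Int) := by
      push_cast [Nat.cast_sub (by omega : k ≤ 2 * n - 1), Nat.cast_sub (by omega : 1 ≤ 2 * n)]
      omega
    rw [hmin]
    have hdiv : PySem.Int.floordiv (((2 * n - 1 - k : Nat) : Int)) 2 = (((2 * n - 1 - k) / 2 : Nat) : Int) := by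
      exact_mod_cast PySem.Int.floordiv_natCast (2 * n - 1 - k) 2
    have hmod : PySem.Int.mod (((2 * n - 1 - k : Nat) : Int)) 2 = (((2 * n - 1 - k) % 2 : Nat) : Int) := by
      exact_mod_cast PySem.Int.mod_natCast (2 * n - 1 - k) 2
    rw [hdiv, hmod]
    have hne2 : ((2 * n - 1 - k : Nat) : Int) ≠ 2 * d - 2 := by
      have : (2 * n - 1 - k : Nat) < 2 * n := by omega
      omega
    by_cases hpar : (2 * n - 1 - k) % 2 = 1
    · rw [if_pos (Or.inl (by exact_mod_cast by omega)), pvH, if_pos hpar]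
    · have h0 : (2 * n - 1 - k) % 2 = 0 := by omega
      rw [if_neg (by push Not; exact ⟨by exact_mod_cast h0, hne2⟩), pvH, if_neg hpar]

-- ===== VERDICT (by name: the statement is the Claim_ definition above) =====
theorem first_neighbours_indices2_spec : Claim_equal_first_neighbours_indices2 := by
  intro c t _
  unfold Spec_first_neighbours_indices2
  rcases lt_trichotomy c t with h | h | h
  · rw [pv_B_eq c t (ne_of_lt h)]
    have habs : |c - t| = t - c := by rw [abs_sub_comm]; exact abs_of_pos (by omega)
    unfold first_neighbours_indices2
    simp only [if_pos h]
    rw [PySem.List.foldl_append_eq_flatMap, PySem.List.foldl_append_eq_flatMap]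
    rw [show ((|c - t| : Int) - 2) = (-1 : Int) + 1 + (|c - t| - 1) - 1 by ring]
    rw [show PySem.List.pyRange ((-1 : Int) + 1 + (|c - t| - 1) - 1) (-1) (-1)
          = (PySem.List.pyRange 0 (|c - t| - 1) 1).reverse by
        rw [PySem.List.pyRange_neg_one_eq_reverse]; norm_num]
    rw [pv_rev_flatMap (f := fun i => [[c + i + 1, c + i], [c + i, c + i + 1]])
        (g := fun i => [[c + i, c + i + 1], [c + i + 1, c + i]]) _ (by intro a; simp)]
    rw [PySem.List.pyRange_one, List.flatMap_map]
    rw [show ((|c - t| : Int) - 1 - 0).toNat = (|c - t| - 1).toNat by norm_num]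
    rw [List.nil_append]
    have hF : (List.range ((|c - t| : Int) - 1).toNat).flatMap
        (fun a : Nat => [[c + (0 + (a : Int)) + 1, c + (0 + (a : Int))],
                         [c + (0 + (a : Int)), c + (0 + (a : Int)) + 1]])
        = pvF c 1 (|c - t| - 1).toNat := by
      unfold pvF
      have hfun : (fun a : Nat => [[c + (0 + (a : Int)) + 1, c + (0 + (a : Int))],
                         [c + (0 + (a : Int)), c + (0 + (a : Int)) + 1]])
          = (fun k : Nat => [[c + 1 * (k : Int) + 1, c + 1 * (k : Int)],
                             [c + 1 * (k : Int), c + 1 * (k : Int) + 1]]) := by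
        funext a; norm_num
      rw [hfun]
    rw [hF]
    have hc : c + |c - t| - 1 = c + 1 * (((|c - t| : Int) - 1).toNat : Int) := by
      rw [habs]; push_cast [Int.toNat_of_nonneg (by omega : (0:Int) ≤ t - c - 1)]; ring
    rw [hc]
  · subst h
    simp [first_neighbours_indices2, first_neighbours_indices2_alt]
  · rw [pv_B_eq c t (ne_of_gt h)]
    have habs : |c - t| = c - t := abs_of_pos (by omega)
    unfold first_neighbours_indices2
    simp only [if_neg (not_lt_of_gt h), if_pos h]
    rw [PySem.List.foldl_append_eq_flatMap, PySem.List.foldl_append_eq_flatMap]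
    rw [show ((|c - t| : Int) - 2) = (-1 : Int) + 1 + (|c - t| - 1) - 1 by ring]
    rw [show PySem.List.pyRange ((-1 : Int) + 1 + (|c - t| - 1) - 1) (-1) (-1)
          = (PySem.List.pyRange 0 (|c - t| - 1) 1).reverse by
        rw [PySem.List.pyRange_neg_one_eq_reverse]; norm_num]
    rw [pv_rev_flatMap (f := fun i => [[c - i - 1, c - i], [c - i, c - i - 1]])
        (g := fun i => [[c - i, c - i - 1], [c - i - 1, c - i]]) _ (by intro a; simp)]
    rw [PySem.List.pyRange_one, List.flatMap_map]
    rw [show ((|c - t| : Int) - 1 - 0).toNat = (|c - t| - 1).toNat by norm_num]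
    rw [List.nil_append]
    have hF : (List.range ((|c - t| : Int) - 1).toNat).flatMap
        (fun a : Nat => [[c - (0 + (a : Int)) - 1, c - (0 + (a : Int))],
                         [c - (0 + (a : Int)), c - (0 + (a : Int)) - 1]])
        = pvF c (-1) (|c - t| - 1).toNat := by
      unfold pvF
      have hfun : (fun a : Nat => [[c - (0 + (a : Int)) - 1, c - (0 + (a : Int))],
                         [c - (0 + (a : Int)), c - (0 + (a : Int)) - 1]])
          = (fun k : Nat => [[c + -1 * (k : Int) + -1, c + -1 * (k : Int)],
                             [c + -1 * (k : Int), c + -1 * (k : Int) + -1]]) := by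
        funext a; norm_num; omega
      rw [hfun]
    rw [hF]
    have hc : c - |c - t| + 1 = c + (-1) * (((|c - t| : Int) - 1).toNat : Int) := by
      rw [habs]; push_cast [Int.toNat_of_nonneg (by omega : (0:Int) ≤ c - t - 1)]; ring
    rw [hc]
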